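-- pv_equiv track=rewrite | github.com/JojoSwims/McHacks9 | reddit_praw.py | get_unique_sub_list
-- ===== SOURCE A (Python) =====
-- def get_unique_sub_list(list_of_posts):
--     unique_subs = {}
--     for post in list_of_posts:
--         # post is (subreddit, upvotes, list of comments)
--         if post[0] in unique_subs:
--             unique_subs[post[0]] = (
--                 unique_subs[post[0]][0] + post[1], unique_subs[post[0]][1]+post[2])
--
--         else:
--             unique_subs[post[0]] = (post[1], post[2])
--     return unique_subs
-- ===== SOURCE B (Python) =====
-- def get_unique_sub_list(list_of_posts):
--     # Group posts by subreddit first (keys in first-seen order), then reduce each group.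
--     groups = {}
--     for sub, upvotes, comments in list_of_posts:
--         groups.setdefault(sub, []).append((upvotes, comments))
--     result = {}
--     for sub, entries in groups.items():
--         total = 0
--         all_comments = []
--         for upvotes, comments in entries:
--             total = total + upvotes
--             all_comments = all_comments + comments
--         result[sub] = (total, all_comments)
--     return result
-- ===== Notes on version B (the rewrite author's own statement) =====
-- stated objective: alternative
-- what changed: Replaces A's single accumulate-while-scanning pass (updating running (sum, comments) tuples in the dict) by a two-phase build-table-then-reduce: first group posts per subreddit into lists in first-seen order, then reduce each group to (upvote sum, concatenated comments).
import Mathlib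
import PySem

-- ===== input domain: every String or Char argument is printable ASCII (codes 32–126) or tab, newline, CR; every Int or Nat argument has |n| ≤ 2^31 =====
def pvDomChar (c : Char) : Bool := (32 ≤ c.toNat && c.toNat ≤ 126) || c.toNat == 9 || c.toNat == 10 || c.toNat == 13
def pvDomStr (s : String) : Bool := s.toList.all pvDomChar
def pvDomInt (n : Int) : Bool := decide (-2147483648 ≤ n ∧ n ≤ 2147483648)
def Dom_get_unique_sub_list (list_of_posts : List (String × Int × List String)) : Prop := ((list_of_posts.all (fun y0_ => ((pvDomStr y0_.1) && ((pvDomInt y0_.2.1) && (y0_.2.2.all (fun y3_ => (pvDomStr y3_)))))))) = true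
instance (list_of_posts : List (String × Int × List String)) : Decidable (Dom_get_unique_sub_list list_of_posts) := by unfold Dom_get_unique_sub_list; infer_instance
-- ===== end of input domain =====

-- B replaces A's accumulate-while-scanning dict pass by a group-by-subreddit pass followed by a
-- per-group reduce (same cost; a genuinely different, two-phase decomposition).
-- ===== PORT A =====
-- Port of A: one pass accumulating (upvotes, comments) per subreddit in a dict.
def get_unique_sub_list (list_of_posts : List (String × Int × List String)) : List (String × Int × List String) :=
  (list_of_posts.foldl (fun unique_subs post =>
      match unique_subs.get? post.1 with
      | some v => unique_subs.insert post.1 (v.1 + post.2.1, v.2 ++ post.2.2)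
      | none   => unique_subs.insert post.1 (post.2.1, post.2.2))
    (PySem.Dict.empty : PySem.Dict String (Int × List String))).items

-- ===== PORT B =====
-- Port of B: group posts by subreddit, then reduce each group.
def pvReduce (entries : List (Int × List String)) : Int × List String :=
  entries.foldl (fun acc e => (acc.1 + e.1, acc.2 ++ e.2)) ((0 : Int), ([] : List String))

def get_unique_sub_list_alt (list_of_posts : List (String × Int × List String)) : List (String × Int × List String) :=
  let groups := list_of_posts.foldl
    (fun g p => g.modify p.1 [] (· ++ [p.2]))
    (PySem.Dict.empty : PySem.Dict String (List (Int × List String)))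
  (groups.items.foldl (fun r kv => r.insert kv.1 (pvReduce kv.2))
    (PySem.Dict.empty : PySem.Dict String (Int × List String))).items

-- ===== PRECONDITION & SPEC =====
def Spec_get_unique_sub_list (list_of_posts : List (String × Int × List String)) (out : List (String × Int × List String)) : Prop := out = get_unique_sub_list_alt list_of_posts
instance (list_of_posts : List (String × Int × List String)) (out : List (String × Int × List String)) : Decidable (Spec_get_unique_sub_list list_of_posts out) := by unfold Spec_get_unique_sub_list; infer_instance

-- ===== CLAIM (what is proved, stated in full; the proofs are below) =====
def Claim_equal_get_unique_sub_list : Prop := ∀ (list_of_posts : List (String × Int × List String)), Dom_get_unique_sub_list list_of_posts → Spec_get_unique_sub_list list_of_posts (get_unique_sub_list list_of_posts)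

-- ===== LEMMAS AND PROOFS =====

-- A's loop body (match on get?) is the uniform "insert the updated accumulation" step.
theorem pvStepA_eq :
    (fun (d : PySem.Dict String (Int × List String)) (post : String × Int × List String) =>
      match d.get? post.1 with
      | some v => d.insert post.1 (v.1 + post.2.1, v.2 ++ post.2.2)
      | none   => d.insert post.1 (post.2.1, post.2.2))
    = fun d post => d.insert post.1
        ((d.getD post.1 (0, [])).1 + post.2.1, (d.getD post.1 (0, [])).2 ++ post.2.2) := by
  funext d post
  cases h : d.get? post.1 <;> simp [PySem.Dict.getD_eq_get?_getD, h]

-- The value A's accumulator holds at key k is the reduce of the entries of posts keyed k.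
theorem pvA_getD (l : List (String × Int × List String))
    (d : PySem.Dict String (Int × List String)) (k : String) :
    (l.foldl (fun d post => d.insert post.1
        ((d.getD post.1 (0, [])).1 + post.2.1, (d.getD post.1 (0, [])).2 ++ post.2.2)) d).getD k (0, [])
    = ((l.filter (fun p => p.1 == k)).map (·.2)).foldl
        (fun acc e => (acc.1 + e.1, acc.2 ++ e.2)) (d.getD k (0, [])) := by
  induction l generalizing d with
  | nil => rfl
  | cons p t ih =>
    simp only [List.foldl_cons, List.filter_cons]
    by_cases h : p.1 = k
    · simp [h, ih]
    · simp [h, ih, PySem.Dict.getD_insert]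
      rw [if_neg (Ne.symm h)]

-- Pointwise: A's accumulated value at k equals the reduce of B's group at k.
theorem pvPointwise (l : List (String × Int × List String)) (k : String) :
    (l.foldl (fun d post => d.insert post.1
        ((d.getD post.1 (0, [])).1 + post.2.1, (d.getD post.1 (0, [])).2 ++ post.2.2))
      (PySem.Dict.empty : PySem.Dict String (Int × List String))).getD k (0, [])
    = pvReduce ((l.foldl (fun g p => g.modify p.1 [] (· ++ [p.2]))
        (PySem.Dict.empty : PySem.Dict String (List (Int × List String)))).getD k []) := by
  rw [pvA_getD, PySem.Dict.getD_foldl_modify_append]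
  simp [pvReduce, PySem.Dict.getD_empty]

-- ===== VERDICT (by name: the statement is the Claim_ definition above) =====
theorem get_unique_sub_list_spec : Claim_equal_get_unique_sub_list := by
  intro l _
  unfold Spec_get_unique_sub_list get_unique_sub_list get_unique_sub_list_alt
  rw [pvStepA_eq]
  set g := l.foldl (fun g p => g.modify p.1 [] (· ++ [p.2]))
    (PySem.Dict.empty : PySem.Dict String (List (Int × List String))) with hg
  set dA := l.foldl (fun d post => d.insert post.1
      ((d.getD post.1 (0, [])).1 + post.2.1, (d.getD post.1 (0, [])).2 ++ post.2.2))
    (PySem.Dict.empty : PySem.Dict String (Int × List String)) with hdA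
  have hgnd : g.keys.Nodup := by
    rw [hg]
    exact PySem.Dict.nodup_keys_foldl_modify_key l (fun p => p.1) [] _ _ PySem.Dict.nodup_keys_empty
  have hand : dA.keys.Nodup := by
    rw [hdA]
    exact PySem.Dict.nodup_keys_foldl_insert_key l (fun p => p.1) _ _ PySem.Dict.nodup_keys_empty
  have hkeys : dA.keys = g.keys := by
    rw [hdA, hg, PySem.Dict.keys_foldl_insert_key, PySem.Dict.keys_foldl_modify_key]
    rfl
  have hres := PySem.Dict.items_foldl_insert_fresh g.items (fun kv => kv.1)
    (fun kv => pvReduce kv.2) (PySem.Dict.empty : PySem.Dict String (Int × List String))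
    (by intro a _; simp [PySem.Dict.contains_empty])
    (by simpa [PySem.Dict.keys] using hgnd)
  simp only [PySem.Dict.empty, List.nil_append] at hres
  change dA.items
    = (List.foldl (fun (d : PySem.Dict String (Int × List String)) a => d.insert a.1 (pvReduce a.2))
        { items := [] } g.items).items
  rw [hres, PySem.Dict.items_eq_map_keys dA hand (0, []),
      PySem.Dict.items_eq_map_keys g hgnd [], hkeys, List.map_map]
  refine List.map_congr_left ?_
  intro k _
  simp [pvPointwise, hg, hdA]
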